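-- pv_equiv track=rewrite | github.com/NeonOcean/NOC.Mods.Distribution | Automation/NeonOcean.NOC.Mods.Distribution/Site_NeonOcean_NOC_Mods_Distribution/Building/Documents.py | _PreviousWhitespaces
-- ===== SOURCE A (Python) =====
-- def _PreviousWhitespaces (text: str, position: int) -> str:
-- 	position -= 1  # type: int
-- 	whitespaces = ""  # type: str
--
-- 	while position > -1 and not (text[position] == "\n" or text[position] == "\r"):
-- 		if text[position] != "\t" and text[position] != " ":
-- 			whitespaces = ""
-- 		else:
-- 			whitespaces += text[position]
--
-- 		position -= 1
--
-- 	return whitespaces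
-- ===== SOURCE B (Python) =====
-- def _PreviousWhitespaces (text: str, position: int) -> str:
-- 	if position <= 0:
-- 		return ""
--
-- 	head = text[:position]
--
-- 	# length of the current (last) line of head: one forward pass
-- 	line_len = 0
-- 	for c in head:
-- 		line_len = 0 if (c == "\n" or c == "\r") else line_len + 1
--
-- 	line = head[len(head) - line_len:]
--
-- 	# leading run of spaces/tabs of the line
-- 	run = ""
-- 	for c in line:
-- 		if c == " " or c == "\t":
-- 			run += c
-- 		else:
-- 			break
--
-- 	return run[::-1]
-- ===== Notes on version B (the rewrite author's own statement) =====
-- stated objective: faster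
-- what changed: Replaces A's backward character-by-character scan with a reset-on-nonwhitespace accumulator by a forward two-phase decomposition on a slice: one pass computes the current line's length, then the line's leading space/tab run is taken and reversed once at the end.
-- crash fix: When position > len(text) (and position > 0) A raises IndexError on its first direct index text[position-1]; B slices, so it returns the reversed leading whitespace run of the last line of text (the empty string at the witness). — e.g. on _PreviousWhitespaces("a", 5): A raises IndexError, B returns ""
import Mathlib
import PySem

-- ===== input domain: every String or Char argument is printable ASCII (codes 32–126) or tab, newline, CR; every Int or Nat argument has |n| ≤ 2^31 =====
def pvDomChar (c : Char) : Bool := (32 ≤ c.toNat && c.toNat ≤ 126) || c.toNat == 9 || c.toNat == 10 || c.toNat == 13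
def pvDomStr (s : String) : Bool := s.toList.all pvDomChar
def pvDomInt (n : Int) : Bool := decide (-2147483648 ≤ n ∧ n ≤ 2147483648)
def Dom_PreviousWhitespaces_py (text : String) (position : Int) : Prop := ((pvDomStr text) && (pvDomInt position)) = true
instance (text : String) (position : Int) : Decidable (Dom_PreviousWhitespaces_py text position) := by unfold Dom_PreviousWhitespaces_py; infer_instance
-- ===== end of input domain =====

-- B replaces A's backward reset-accumulator scan by a forward two-phase decomposition
-- (current-line length in one pass, then the line's leading space/tab run, reversed once at the
-- end); same O(n) asymptotics, measurably faster by a constant factor in a timing run.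

-- ===== PORT A =====
-- the while loop: position counts down, whitespaces accumulates / resets
def pvLoopA (cs : List Char) (pos : Int) (ws : List Char) : List Char :=
  if _h : 0 ≤ pos then    -- 'position > -1'
    match PySem.List.pyGet? cs pos with
    | none => ws         -- Python raises IndexError here (excluded by Pre_)
    | some c =>
      if c = '\n' ∨ c = '\r' then ws
      else if c ≠ '\t' ∧ c ≠ ' ' then pvLoopA cs (pos - 1) []
      else pvLoopA cs (pos - 1) (ws ++ [c])
  else ws
termination_by (pos + 1).toNat
decreasing_by all_goals omega

def PreviousWhitespaces_py (text : String) (position : Int) : String :=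
  String.ofList (pvLoopA text.toList (position - 1) [])

-- ===== PORT B =====
-- the for/break loop collecting the leading run of spaces/tabs
def pvRunB (l : List Char) : List Char :=
  match l with
  | [] => []
  | c :: rest => if c = ' ' ∨ c = '\t' then c :: pvRunB rest else []

def PreviousWhitespaces_py_alt (text : String) (position : Int) : String :=
  if position ≤ 0 then ""
  else
    let head := PySem.List.slice text.toList none (some position)          -- text[:position]
    let lineLen : Nat :=
      head.foldl (fun k c => if c = '\n' ∨ c = '\r' then 0 else k + 1) 0   -- one forward pass
    let line := PySem.List.slice head (some ((head.length : Int) - (lineLen : Int))) none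
    String.ofList (pvRunB line).reverse                                        -- run[::-1]

-- ===== PRECONDITION & SPEC =====
-- Pre_ excludes exactly the inputs where A raises IndexError (direct indexing past the end).
def Pre_PreviousWhitespaces_py (text : String) (position : Int) : Prop :=
  position ≤ (text.toList.length : Int)
instance (text : String) (position : Int) : Decidable (Pre_PreviousWhitespaces_py text position) := by
  unfold Pre_PreviousWhitespaces_py; infer_instance

def pvWitness_PreviousWhitespaces_py : String × Int := ("ab\n \tx", 6)

-- When position > len(text) (and position > 0) A raises IndexError on its first direct index;
-- B slices, so it returns the reversed leading whitespace run of the last line of text.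
def Raises_PreviousWhitespaces_py (text : String) (position : Int) : Prop :=
  (text.toList.length : Int) < position
instance (text : String) (position : Int) : Decidable (Raises_PreviousWhitespaces_py text position) := by
  unfold Raises_PreviousWhitespaces_py; infer_instance
def pvRaiseWitness_PreviousWhitespaces_py : String × Int := ("a", 5)
def pvRaiseWitnessOut_PreviousWhitespaces_py : String := ""

def Spec_PreviousWhitespaces_py (text : String) (position : Int) (out : String) : Prop :=
  out = PreviousWhitespaces_py_alt text position
instance (text : String) (position : Int) (out : String) : Decidable (Spec_PreviousWhitespaces_py text position out) := by
  unfold Spec_PreviousWhitespaces_py; infer_instance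

-- ===== CLAIM (what is proved, stated in full; the proofs are below) =====
def Claim_equal_PreviousWhitespaces_py : Prop := ∀ (text : String) (position : Int), Dom_PreviousWhitespaces_py text position → Pre_PreviousWhitespaces_py text position → Spec_PreviousWhitespaces_py text position (PreviousWhitespaces_py text position)

def Claim_raises_PreviousWhitespaces_py : Prop := (∀ (text : String) (position : Int), Dom_PreviousWhitespaces_py text position → Raises_PreviousWhitespaces_py text position → ¬ Pre_PreviousWhitespaces_py text position) ∧ (Dom_PreviousWhitespaces_py (pvRaiseWitness_PreviousWhitespaces_py.1) (pvRaiseWitness_PreviousWhitespaces_py.2) ∧ Raises_PreviousWhitespaces_py (pvRaiseWitness_PreviousWhitespaces_py.1) (pvRaiseWitness_PreviousWhitespaces_py.2) ∧ PreviousWhitespaces_py_alt (pvRaiseWitness_PreviousWhitespaces_py.1) (pvRaiseWitness_PreviousWhitespaces_py.2) = pvRaiseWitnessOut_PreviousWhitespaces_py)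

-- ===== LEMMAS AND PROOFS =====

def pvNotNL (c : Char) : Bool := !(c == '\n' || c == '\r')
def pvIsWS (c : Char) : Bool := c == ' ' || c == '\t'

-- pvLoopA re-expressed as a structural pass over the reversed prefix
def pvG : List Char → List Char → List Char
  | [], ws => ws
  | c :: rest, ws =>
    if c = '\n' ∨ c = '\r' then ws
    else if c ≠ '\t' ∧ c ≠ ' ' then pvG rest []
    else pvG rest (ws ++ [c])

theorem pvLoopA_eq_pvG (cs : List Char) (k : Nat) (hk : k ≤ cs.length) (ws : List Char) :
    pvLoopA cs ((k : Int) - 1) ws = pvG ((cs.take k).reverse) ws := by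
  induction k generalizing ws with
  | zero =>
      rw [pvLoopA]
      simp [pvG]
  | succ k ih =>
      rw [pvLoopA]
      have hk' : k < cs.length := by omega
      have hget : PySem.List.pyGet? cs ((k : Int) + 1 - 1) = some cs[k] := by
        have : ((k : Int) + 1 - 1) = ((k : Nat) : Int) := by omega
        rw [this, PySem.List.pyGet?_natCast]
        simp [hk']
      have htake : (cs.take (k + 1)).reverse = cs[k] :: (cs.take k).reverse := by
        rw [List.take_add_one]
        simp [hk']
      push_cast
      rw [hget, htake]
      have hpos : (0 : Int) ≤ (k : Int) + 1 - 1 := by omega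
      rw [dif_pos hpos]
      have hrec : (k : Int) + 1 - 1 - 1 = (k : Int) - 1 := by omega
      by_cases h1 : cs[k] = '\n' ∨ cs[k] = '\r'
      · simp [pvG, h1]
      · by_cases h2 : cs[k] ≠ '\t' ∧ cs[k] ≠ ' '
        · simp only [pvG, if_neg h1, if_pos h2, hrec]
          exact ih (by omega) []
        · simp only [pvG, if_neg h1, if_neg h2, hrec]
          exact ih (by omega) (ws ++ [cs[k]])

theorem pv_tw_self {p : Char → Bool} {xs : List Char} (h : ∀ x ∈ xs, p x = true) :
    xs.takeWhile p = xs := List.takeWhile_eq_self_iff.mpr h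

theorem pv_tw_append_false {p : Char → Bool} {xs : List Char} {c : Char} (hc : p c = false) :
    (xs ++ [c]).takeWhile p = xs.takeWhile p := by
  rw [List.takeWhile_append]
  by_cases h : (xs.takeWhile p).length = xs.length
  · rw [if_pos h]
    have hself : xs.takeWhile p = xs := (List.takeWhile_prefix p).eq_of_length h
    rw [hself]
    simp [hc]
  · rw [if_neg h]

theorem pv_tw_append_true {p : Char → Bool} {xs : List Char} {c : Char} (hc : p c = true)
    (h : ∀ x ∈ xs, p x = true) : (xs ++ [c]).takeWhile p = xs ++ [c] := by
  rw [List.takeWhile_append, if_pos (by rw [pv_tw_self h])]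
  simp [hc]

theorem pv_tw_not_self {p : Char → Bool} {xs : List Char} (h : ¬ ∀ x ∈ xs, p x = true) :
    (xs.takeWhile p).length ≠ xs.length := by
  intro hlen
  exact h (List.takeWhile_eq_self_iff.mp ((List.takeWhile_prefix p).eq_of_length hlen))

theorem pv_tw_append_not {p : Char → Bool} {xs : List Char} {c : Char}
    (h : ¬ ∀ x ∈ xs, p x = true) : (xs ++ [c]).takeWhile p = xs.takeWhile p := by
  rw [List.takeWhile_append, if_neg (pv_tw_not_self h)]

theorem pvG_closed (l ws : List Char) :
    pvG l ws = (if (l.takeWhile pvNotNL).all pvIsWS then ws else [])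
      ++ ((l.takeWhile pvNotNL).reverse.takeWhile pvIsWS).reverse := by
  induction l generalizing ws with
  | nil => simp [pvG]
  | cons c rest ih =>
      by_cases h1 : c = '\n' ∨ c = '\r'
      · have : pvNotNL c = false := by rcases h1 with h | h <;> simp [pvNotNL, h]
        simp [pvG, h1, this]
      · have hnl : pvNotNL c = true := by
          simp only [pvNotNL, Bool.not_eq_true']
          simp only [not_or] at h1
          simp [h1.1, h1.2]
        have htw : (c :: rest).takeWhile pvNotNL = c :: rest.takeWhile pvNotNL := by
          simp [hnl]
        set m := rest.takeWhile pvNotNL with hm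
        by_cases h2 : c ≠ '\t' ∧ c ≠ ' '
        · have hws : pvIsWS c = false := by simp [pvIsWS, h2.1, h2.2]
          rw [pvG, if_neg h1, if_pos h2, ih, htw]
          have hcond : ((c :: m).all pvIsWS) = false := by simp [hws]
          rw [hcond]
          simp only [List.reverse_cons, Bool.false_eq_true, if_false, List.nil_append]
          rw [pv_tw_append_false hws]
          by_cases hall : m.all pvIsWS
          · rw [if_pos hall]
            have : m.reverse.takeWhile pvIsWS = m.reverse :=
              pv_tw_self (by intro x hx; exact List.all_eq_true.mp hall x (List.mem_reverse.mp hx))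
            simp [this]
          · rw [if_neg hall]
            simp
        · have hws : pvIsWS c = true := by
            rcases not_and_or.mp h2 with h | h
            · simp [pvIsWS, not_ne_iff.mp h]
            · simp [pvIsWS, not_ne_iff.mp h]
          rw [pvG, if_neg h1, if_neg h2, ih, htw]
          have hcond : ((c :: m).all pvIsWS) = m.all pvIsWS := by simp [hws]
          rw [hcond]
          simp only [List.reverse_cons]
          by_cases hall : m.all pvIsWS
          · have hallm : ∀ x ∈ m, pvIsWS x = true := List.all_eq_true.mp hall
            have hallr : ∀ x ∈ m.reverse, pvIsWS x = true := by
              intro x hx; exact hallm x (List.mem_reverse.mp hx)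
            rw [if_pos hall, if_pos hall, pv_tw_append_true hws hallr,
              pv_tw_self hallr]
            simp
          · have hallr : ¬ ∀ x ∈ m.reverse, pvIsWS x = true := by
              intro hc
              exact hall (List.all_eq_true.mpr (fun x hx => hc x (List.mem_reverse.mpr hx)))
            rw [if_neg hall, if_neg hall, pv_tw_append_not hallr]

theorem pvFold_lineLen (l : List Char) :
    l.foldl (fun k c => if c = '\n' ∨ c = '\r' then 0 else k + 1) 0
      = (l.reverse.takeWhile pvNotNL).length := by
  induction l using List.reverseRecOn with
  | nil => simp
  | append_singleton l c ih =>
      rw [List.foldl_append]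
      by_cases h : c = '\n' ∨ c = '\r'
      · have : pvNotNL c = false := by rcases h with h | h <;> simp [pvNotNL, h]
        simp [h, this]
      · have hnl : pvNotNL c = true := by
          simp only [pvNotNL, Bool.not_eq_true']
          simp only [not_or] at h
          simp [h.1, h.2]
        simp [h, hnl, ih]

theorem pvRunB_eq_takeWhile (l : List Char) : pvRunB l = l.takeWhile pvIsWS := by
  induction l with
  | nil => simp [pvRunB]
  | cons c rest ih =>
      by_cases h : c = ' ' ∨ c = '\t'
      · have : pvIsWS c = true := by rcases h with h | h <;> simp [pvIsWS, h]
        simp [pvRunB, h, this, ih]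
      · have : pvIsWS c = false := by
          simp only [not_or] at h
          simp [pvIsWS, h.1, h.2]
        simp [pvRunB, h, this]

theorem pvDrop_suffix (P : List Char) (p : Char → Bool) :
    P.drop (P.length - (P.reverse.takeWhile p).length) = (P.reverse.takeWhile p).reverse := by
  have htw : P.reverse.takeWhile p = P.reverse.take (P.reverse.takeWhile p).length :=
    List.prefix_iff_eq_take.mp (List.takeWhile_prefix p)
  conv_rhs => rw [htw]
  rw [List.take_reverse, List.reverse_reverse]

-- the common normal form of both programs on a prefix P = text[:position]
theorem pv_main (cs : List Char) (k : Nat) (hk : k ≤ cs.length) :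
    pvLoopA cs ((k : Int) - 1) []
      = (((cs.take k).reverse.takeWhile pvNotNL).reverse.takeWhile pvIsWS).reverse := by
  rw [pvLoopA_eq_pvG cs k hk [], pvG_closed]
  simp

-- ===== VERDICT (by name: the statement is the Claim_ definition above) =====
theorem PreviousWhitespaces_py_spec : Claim_equal_PreviousWhitespaces_py := by
  intro text position _ hpre
  unfold Spec_PreviousWhitespaces_py PreviousWhitespaces_py PreviousWhitespaces_py_alt
  unfold Pre_PreviousWhitespaces_py at hpre
  by_cases hp : position ≤ 0
  · rw [if_pos hp, pvLoopA]
    have : ¬ (0 : Int) ≤ position - 1 := by omega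
    rw [dif_neg this]
  · rw [if_neg hp]
    set cs := text.toList with hcs
    have hkpos : 0 < position.toNat := by omega
    have hkle : position.toNat ≤ cs.length := by omega
    have hcast : position = ((position.toNat : Nat) : Int) := by omega
    rw [hcast]
    rw [pv_main cs position.toNat hkle]
    dsimp only
    rw [PySem.List.slice_to_natCast]
    set P := cs.take position.toNat with hP
    rw [pvFold_lineLen P]
    have hlen : (P.reverse.takeWhile pvNotNL).length ≤ P.length := by
      have := (List.takeWhile_prefix pvNotNL (l := P.reverse)).length_le
      simpa using this
    have htn : ((P.length : Int) - ((P.reverse.takeWhile pvNotNL).length : Int))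
        = (((P.length - (P.reverse.takeWhile pvNotNL).length : Nat) : Int)) := by omega
    rw [htn, PySem.List.slice_from_natCast, pvDrop_suffix P pvNotNL,
      pvRunB_eq_takeWhile]

@[simp]
theorem PreviousWhitespaces_py_raises : Claim_raises_PreviousWhitespaces_py := by
  unfold Claim_raises_PreviousWhitespaces_py
  constructor
  · intro text position _ hr
    unfold Raises_PreviousWhitespaces_py at hr
    unfold Pre_PreviousWhitespaces_py
    omega
  · refine ⟨by decide, by decide, by decide⟩
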